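-- pv_equiv track=rewrite | github.com/MairtinOFlatharta/Advent-of-Code-2025 | day6/cephalod-maths-2.py | parse_operators
-- ===== SOURCE A (Python) =====
-- def parse_operators(raw):
--     # Convert string of operators and spaces into list of tuples
--     # where each tuple contains the operater and the max length
--     # of numbers used in the operation, as all numbers have 1 space
--     # between them
--     # E.x. "+   * +   " => [("+", 3), ("*", 1), ("+", 4)]
--     parsed = []
--     for i in range(0, len(raw)):
--         if raw[i] in "+*":
--             operator = raw[i]
--             index = i + 1
--             space_count = 1
--             while index < len(raw) and raw[index] in " \n":
--                 space_count += 1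
--                 index += 1
--             parsed.append((operator, space_count))
--     return parsed
-- ===== SOURCE B (Python) =====
-- def parse_operators(raw):
--     # Single flat state-machine pass: append (op, 1) on an operator,
--     # bump the last tuple's count on " \n" while counting.
--     parsed = []
--     counting = False
--     for ch in raw:
--         if ch in "+*":
--             parsed.append((ch, 1))
--             counting = True
--         elif counting and ch in " \n":
--             op, n = parsed[-1]
--             parsed[-1] = (op, n + 1)
--         else:
--             counting = False
--     return parsed
-- ===== Notes on version B (the rewrite author's own statement) =====
-- stated objective: simpler
-- what changed: Replaced A's outer index scan with a nested look-ahead while-loop by a single flat state-machine pass that appends (op,1) on an operator and bumps the last tuple's count on ' '/'\n' while a counting flag is set.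
import Mathlib
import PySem

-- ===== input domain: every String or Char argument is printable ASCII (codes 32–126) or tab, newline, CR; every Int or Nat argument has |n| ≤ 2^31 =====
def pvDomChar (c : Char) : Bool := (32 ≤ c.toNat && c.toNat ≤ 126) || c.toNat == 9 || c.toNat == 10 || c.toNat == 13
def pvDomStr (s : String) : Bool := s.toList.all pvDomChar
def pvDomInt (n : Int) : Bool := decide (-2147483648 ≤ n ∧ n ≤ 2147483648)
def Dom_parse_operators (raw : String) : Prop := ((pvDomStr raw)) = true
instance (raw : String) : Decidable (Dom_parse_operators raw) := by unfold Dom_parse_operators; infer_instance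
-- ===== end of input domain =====

-- B replaces A's outer index scan with nested look-ahead while-loop by a single
-- flat state-machine pass over the characters (objective: simpler, one pass).

-- ===== PORT A =====
-- the inner `while index < len(raw) and raw[index] in " \n"` loop
def pvWhileA (cs : List Char) (index : Nat) (space_count : Int) : Int :=
  if index < cs.length ∧ (cs.getD index ' ' = ' ' ∨ cs.getD index ' ' = '\n') then
    pvWhileA cs (index + 1) (space_count + 1)
  else space_count
termination_by cs.length - index
decreasing_by omega

-- literal port of A: for i in range(0, len(raw)): if raw[i] in "+*": … append
-- (indices produced by range are always in bounds, so getD is exact here)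
def parse_operators (raw : String) : List (String × Int) :=
  let cs := raw.toList
  (List.range cs.length).foldl
    (fun parsed i =>
      if cs.getD i ' ' = '+' ∨ cs.getD i ' ' = '*' then
        parsed ++ [(String.mk [cs.getD i ' '], pvWhileA cs (i + 1) 1)]
      else parsed)
    []

-- ===== PORT B =====
-- parsed[-1] = (parsed[-1][0], parsed[-1][1] + 1)
def pvIncLast : List (String × Int) → List (String × Int)
  | [] => []
  | [(s, k)] => [(s, k + 1)]
  | x :: y :: rest => x :: pvIncLast (y :: rest)

-- the flat for-loop over the characters with the `counting` flag
def pvGoB : List Char → List (String × Int) → Bool → List (String × Int)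
  | [], parsed, _ => parsed
  | c :: rest, parsed, counting =>
    if c = '+' ∨ c = '*' then
      pvGoB rest (parsed ++ [(String.mk [c], 1)]) true
    else if counting = true ∧ (c = ' ' ∨ c = '\n') then
      pvGoB rest (pvIncLast parsed) counting
    else
      pvGoB rest parsed false

def parse_operators_alt (raw : String) : List (String × Int) :=
  pvGoB raw.toList [] false

-- ===== PRECONDITION & SPEC =====
def Spec_parse_operators (raw : String) (out : List (String × Int)) : Prop := out = parse_operators_alt raw
instance (raw : String) (out : List (String × Int)) : Decidable (Spec_parse_operators raw out) := by unfold Spec_parse_operators; infer_instance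

-- ===== CLAIM (what is proved, stated in full; the proofs are below) =====
def Claim_equal_parse_operators : Prop := ∀ (raw : String), Dom_parse_operators raw → Spec_parse_operators raw (parse_operators raw)

-- ===== LEMMAS AND PROOFS =====

-- length of the leading run of " \n" characters
def pvRun : List Char → Int
  | [] => 0
  | c :: rest => if c = ' ' ∨ c = '\n' then 1 + pvRun rest else 0

-- common characterisation of both programs
def pvSpec : List Char → List (String × Int)
  | [] => []
  | c :: rest =>
    if c = '+' ∨ c = '*' then (String.mk [c], 1 + pvRun rest) :: pvSpec rest
    else pvSpec rest

theorem pvWhileA_eq (cs : List Char) : ∀ j sc, pvWhileA cs j sc = sc + pvRun (cs.drop j) := by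
  intro j
  induction hn : cs.length - j using Nat.strong_induction_on generalizing j with
  | _ n ih =>
    intro sc
    rw [pvWhileA]
    by_cases hj : j < cs.length
    · have hdrop : cs.drop j = cs.getD j ' ' :: cs.drop (j + 1) := by
        rw [List.getD_eq_getElem _ _ hj]
        exact (List.getElem_cons_drop hj).symm
      by_cases hc : cs.getD j ' ' = ' ' ∨ cs.getD j ' ' = '\n'
      · rw [if_pos ⟨hj, hc⟩, ih (cs.length - (j + 1)) (by omega) (j + 1) rfl, hdrop,
          pvRun, if_pos hc]
        ring
      · rw [if_neg (by tauto), hdrop, pvRun, if_neg hc]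
        ring
    · rw [if_neg (by tauto), List.drop_eq_nil_of_le (by omega), pvRun]
      ring

theorem pvA_fold (cs : List Char) : ∀ k acc, k ≤ cs.length →
    (List.range' k (cs.length - k)).foldl
      (fun parsed i =>
        if cs.getD i ' ' = '+' ∨ cs.getD i ' ' = '*' then
          parsed ++ [(String.mk [cs.getD i ' '], pvWhileA cs (i + 1) 1)]
        else parsed) acc
    = acc ++ pvSpec (cs.drop k) := by
  intro k
  induction hn : cs.length - k using Nat.strong_induction_on generalizing k with
  | _ n ih =>
    intro acc hk
    match n, hn with
    | 0, hn =>
      have : k = cs.length := by omega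
      simp [this, pvSpec]
    | m + 1, hn =>
      have hk' : k < cs.length := by omega
      have hdrop : cs.drop k = cs.getD k ' ' :: cs.drop (k + 1) := by
        rw [List.getD_eq_getElem _ _ hk']
        exact (List.getElem_cons_drop hk').symm
      rw [List.range'_succ, List.foldl_cons]
      have hrec := fun acc => ih (cs.length - (k + 1)) (by omega) (k + 1) rfl acc (by omega)
      rw [show m = cs.length - (k+1) by omega]
      by_cases hc : cs.getD k ' ' = '+' ∨ cs.getD k ' ' = '*'
      · rw [if_pos hc, hrec, hdrop, pvSpec, if_pos hc,
          pvWhileA_eq cs (k + 1) 1, List.append_assoc]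
        rfl
      · rw [if_neg hc, hrec, hdrop, pvSpec, if_neg hc]

theorem pvA_eq_spec (raw : String) : parse_operators raw = pvSpec raw.toList := by
  have := pvA_fold raw.toList 0 [] (by omega)
  simpa [parse_operators, List.range_eq_range'] using this

theorem pvIncLast_append (done : List (String × Int)) (s : String) (k : Int) :
    pvIncLast (done ++ [(s, k)]) = done ++ [(s, k + 1)] := by
  induction done with
  | nil => rfl
  | cons x xs ih =>
    cases xs with
    | nil => simp [pvIncLast]
    | cons y ys => simpa [pvIncLast] using ih

theorem pvGoB_eq (cs : List Char) :
    (∀ acc, pvGoB cs acc false = acc ++ pvSpec cs) ∧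
    (∀ (done : List (String × Int)) (s : String) (k : Int),
      pvGoB cs (done ++ [(s, k)]) true = done ++ (s, k + pvRun cs) :: pvSpec cs) := by
  induction cs with
  | nil => simp [pvGoB, pvSpec, pvRun]
  | cons c rest ih =>
    constructor
    · intro acc
      by_cases hc : c = '+' ∨ c = '*'
      · rw [pvGoB, if_pos hc, ih.2 acc (String.mk [c]) 1, pvSpec, if_pos hc]
      · rw [pvGoB, if_neg hc, if_neg (by tauto), ih.1 acc, pvSpec, if_neg hc]
    · intro done s k
      by_cases hc : c = '+' ∨ c = '*'
      · have hns : ¬ (c = ' ' ∨ c = '\n') := by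
          rcases hc with h | h <;> subst h <;> decide
        rw [pvGoB, if_pos hc]
        have := ih.2 (done ++ [(s, k)]) (String.mk [c]) 1
        rw [this, pvSpec, if_pos hc, pvRun, if_neg hns]
        simp
      · by_cases hs : c = ' ' ∨ c = '\n'
        · rw [pvGoB, if_neg hc, if_pos ⟨rfl, hs⟩, pvIncLast_append,
            ih.2 done s (k + 1), pvSpec, if_neg hc, pvRun, if_pos hs]
          ring_nf
        · rw [pvGoB, if_neg hc, if_neg (by tauto), ih.1, pvSpec, if_neg hc,
            pvRun, if_neg hs]
          simp

theorem pvB_eq_spec (raw : String) : parse_operators_alt raw = pvSpec raw.toList := by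
  simpa [parse_operators_alt] using (pvGoB_eq raw.toList).1 []

-- ===== VERDICT (by name: the statement is the Claim_ definition above) =====
theorem parse_operators_spec : Claim_equal_parse_operators := by
  intro raw _
  unfold Spec_parse_operators
  rw [pvA_eq_spec, pvB_eq_spec]
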